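-- pv_equiv track=rewrite | github.com/mkiezel/Nurikabe_Solver | nurikabe.py | CzyWoda
-- ===== SOURCE A (Python) =====
-- N = 5
--
-- def CzyWoda(plansza):
--     ile = 0
--     for row in range(0, N):
--         for col in range(0, N):
--             if plansza[row][col] == '*':
--                 ile += 1
--     if ile < 2:
--         return True
--
--     for row in range(0, N):
--         for col in range(0, N):
--
--
--
--             if plansza[row][col] == "*":
--                 sum = 0
--
--                 if row < N - 1:
--                     if plansza[row+1][col] == "*":
--                         sum += 1
--                         if col > 0:
--                             if plansza[row+1][col-1] == "*":
--                                 if plansza[row][col-1] == "*":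
--                                     return False
--
--                 if col < N-1:
--                     if plansza[row][col+1] == "*":
--                         sum += 1
--                         if row < N-1:
--                             if plansza[row+1][col+1] == "*":
--                                 if plansza[row+1][col] == "*":
--                                     return False
--
--                 if row > 0:
--                     if plansza[row-1][col] == "*":
--                         sum += 1
--                         if col < N-1:
--                             if plansza[row-1][col+1] == "*":
--                                 if plansza[row][col+1] == "*":
--                                     return False
--
--                 if col >0:
--                     if plansza[row][col-1] == "*":
--                         sum += 1
--                         if row >0:
--                             if plansza[row-1][col-1] == "*":
--                                 if plansza[row-1][col] == "*":
--                                     return False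
--
--                 if sum == 0 or sum == 4:
--                     return False
--     return True
-- ===== SOURCE B (Python) =====
-- N = 5
--
-- def CzyWoda(plansza):
--     ile = sum(1 for r in range(N) for c in range(N) if plansza[r][c] == '*')
--     if ile < 2:
--         return True
--     for r in range(N - 1):
--         for c in range(N - 1):
--             if (plansza[r][c] == '*' and plansza[r][c + 1] == '*'
--                     and plansza[r + 1][c] == '*' and plansza[r + 1][c + 1] == '*'):
--                 return False
--     for r in range(N):
--         for c in range(N):
--             if plansza[r][c] == '*':
--                 k = 0
--                 for dr, dc in ((-1, 0), (1, 0), (0, -1), (0, 1)):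
--                     rr, cc = r + dr, c + dc
--                     if 0 <= rr < N and 0 <= cc < N and plansza[rr][cc] == '*':
--                         k += 1
--                 if k == 0 or k == 4:
--                     return False
--     return True
-- ===== Notes on version B (the rewrite author's own statement) =====
-- stated objective: simpler
-- what changed: A's single fused scan, which detects 2x2 water blocks through four interleaved asymmetric neighbour branches inside the neighbour-count loop body, is replaced by a count pass plus two independent passes: a corner-based 2x2-block check and a delta-list orthogonal-neighbour count with a 0-or-4 test.
import Mathlib
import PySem

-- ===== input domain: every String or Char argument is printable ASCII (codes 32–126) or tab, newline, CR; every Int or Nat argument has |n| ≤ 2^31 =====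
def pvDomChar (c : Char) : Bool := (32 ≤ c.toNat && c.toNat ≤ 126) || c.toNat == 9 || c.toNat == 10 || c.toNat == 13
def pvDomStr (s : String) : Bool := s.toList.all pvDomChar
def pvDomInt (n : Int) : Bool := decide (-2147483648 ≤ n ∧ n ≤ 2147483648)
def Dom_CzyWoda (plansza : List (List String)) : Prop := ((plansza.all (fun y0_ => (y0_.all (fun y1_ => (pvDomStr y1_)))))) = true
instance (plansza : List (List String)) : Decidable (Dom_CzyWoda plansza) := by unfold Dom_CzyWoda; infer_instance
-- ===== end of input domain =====

-- B replaces A's single fused scan (2x2 detection interleaved with the neighbour count)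
-- by a count pass, a separate 2x2-corner pass and a separate delta-based neighbour-count pass.

-- row-major list of the index pairs visited by 'for r in range(m): for c in range(n):'
def pairs (m n : Nat) : List (Nat × Nat) :=
  (List.range m).flatMap (fun r => (List.range n).map (fun c => (r, c)))

-- plansza[r][c]; total stand-in for Python indexing, exact whenever Pre_ holds (all indices in range)
def cellAt (g : List (List String)) (r c : Nat) : String := (g.getD r []).getD c ""

-- ===== PORT A =====
-- body of A's second nested loop at one cell: 'true' = this cell makes A 'return False'
def bodyA (g : List (List String)) (r c : Nat) : Bool :=
  if cellAt g r c = "*" then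
    let s1 : Nat := if r < 5 - 1 ∧ cellAt g (r+1) c = "*" then 1 else 0
    if r < 5 - 1 ∧ cellAt g (r+1) c = "*" ∧ 0 < c ∧
        cellAt g (r+1) (c-1) = "*" ∧ cellAt g r (c-1) = "*" then true
    else
      let s2 : Nat := s1 + (if c < 5 - 1 ∧ cellAt g r (c+1) = "*" then 1 else 0)
      if c < 5 - 1 ∧ cellAt g r (c+1) = "*" ∧ r < 5 - 1 ∧
          cellAt g (r+1) (c+1) = "*" ∧ cellAt g (r+1) c = "*" then true
      else
        let s3 : Nat := s2 + (if 0 < r ∧ cellAt g (r-1) c = "*" then 1 else 0)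
        if 0 < r ∧ cellAt g (r-1) c = "*" ∧ c < 5 - 1 ∧
            cellAt g (r-1) (c+1) = "*" ∧ cellAt g r (c+1) = "*" then true
        else
          let s4 : Nat := s3 + (if 0 < c ∧ cellAt g r (c-1) = "*" then 1 else 0)
          if 0 < c ∧ cellAt g r (c-1) = "*" ∧ 0 < r ∧
              cellAt g (r-1) (c-1) = "*" ∧ cellAt g (r-1) c = "*" then true
          else s4 == 0 || s4 == 4
  else false

-- A's second nested loop with its early 'return False'
def scanA (g : List (List String)) : List (Nat × Nat) → Bool
  | [] => true
  | (r, c) :: rest => if bodyA g r c then false else scanA g rest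

def CzyWoda (plansza : List (List String)) : Bool :=
  let ile := (pairs 5 5).foldl
    (fun a p => if cellAt plansza p.1 p.2 = "*" then a + 1 else a) 0
  if ile < 2 then true
  else scanA plansza (pairs 5 5)

-- ===== PORT B =====
-- B's 2x2 pass body: the four cells of the block with top-left corner (r,c)
def blkB (g : List (List String)) (r c : Nat) : Bool :=
  cellAt g r c == "*" && cellAt g r (c+1) == "*" &&
  cellAt g (r+1) c == "*" && cellAt g (r+1) (c+1) == "*"

def scanBlkB (g : List (List String)) : List (Nat × Nat) → Bool
  | [] => true
  | (r, c) :: rest => if blkB g r c then false else scanBlkB g rest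

def deltasB : List (Int × Int) := [(-1, 0), (1, 0), (0, -1), (0, 1)]

-- B's neighbour-count pass body
def badB (g : List (List String)) (r c : Nat) : Bool :=
  if cellAt g r c = "*" then
    let k := deltasB.foldl (fun k d =>
      let rr : Int := (r : Int) + d.1
      let cc : Int := (c : Int) + d.2
      if 0 ≤ rr ∧ rr < 5 ∧ 0 ≤ cc ∧ cc < 5 ∧ cellAt g rr.toNat cc.toNat = "*" then k + 1
      else k) 0
    k == 0 || k == 4
  else false

def scanBadB (g : List (List String)) : List (Nat × Nat) → Bool
  | [] => true
  | (r, c) :: rest => if badB g r c then false else scanBadB g rest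

def CzyWoda_alt (plansza : List (List String)) : Bool :=
  let ile := (pairs 5 5).countP (fun p => cellAt plansza p.1 p.2 == "*")
  if ile < 2 then true
  else if scanBlkB plansza (pairs 4 4) = false then false
  else scanBadB plansza (pairs 5 5)

-- ===== PRECONDITION & SPEC =====
-- Pre_ excludes exactly the boards on which the Python raises IndexError:
-- A unconditionally indexes plansza[r][c] for all 0 ≤ r,c < 5.
def Pre_CzyWoda (plansza : List (List String)) : Prop :=
  5 ≤ plansza.length ∧ ∀ row ∈ plansza.take 5, 5 ≤ row.length
instance (plansza : List (List String)) : Decidable (Pre_CzyWoda plansza) := by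
  unfold Pre_CzyWoda; infer_instance

def pvWitness_CzyWoda : List (List String) :=
  [["*", ".", ".", ".", "*"],
   ["*", ".", ".", ".", "."],
   [".", ".", "*", ".", "."],
   [".", ".", "*", ".", "."],
   [".", ".", ".", ".", "."]]

def Spec_CzyWoda (plansza : List (List String)) (out : Bool) : Prop := out = CzyWoda_alt plansza
instance (plansza : List (List String)) (out : Bool) : Decidable (Spec_CzyWoda plansza out) := by
  unfold Spec_CzyWoda; infer_instance

-- ===== CLAIM (what is proved, stated in full; the proofs are below) =====
def Claim_equal_CzyWoda : Prop := ∀ (plansza : List (List String)), Dom_CzyWoda plansza → Pre_CzyWoda plansza → Spec_CzyWoda plansza (CzyWoda plansza)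

-- ===== LEMMAS AND PROOFS =====

lemma mem_pairs {m n : Nat} {p : Nat × Nat} :
    p ∈ pairs m n ↔ p.1 < m ∧ p.2 < n := by
  cases p with
  | mk r c => simp [pairs, List.mem_flatMap, List.mem_map, List.mem_range]

lemma scanA_eq (g : List (List String)) (L : List (Nat × Nat)) :
    scanA g L = !(L.any (fun p => bodyA g p.1 p.2)) := by
  induction L with
  | nil => rfl
  | cons p rest ih =>
    cases p with
    | mk r c => simp only [scanA, List.any_cons]; by_cases h : bodyA g r c = true <;> simp [h, ih]

lemma scanBlkB_eq (g : List (List String)) (L : List (Nat × Nat)) :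
    scanBlkB g L = !(L.any (fun p => blkB g p.1 p.2)) := by
  induction L with
  | nil => rfl
  | cons p rest ih =>
    cases p with
    | mk r c => simp only [scanBlkB, List.any_cons]; by_cases h : blkB g r c = true <;> simp [h, ih]

lemma scanBadB_eq (g : List (List String)) (L : List (Nat × Nat)) :
    scanBadB g L = !(L.any (fun p => badB g p.1 p.2)) := by
  induction L with
  | nil => rfl
  | cons p rest ih =>
    cases p with
    | mk r c => simp only [scanBadB, List.any_cons]; by_cases h : badB g r c = true <;> simp [h, ih]

lemma count_eq (g : List (List String)) (L : List (Nat × Nat)) (n : Nat) :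
    L.foldl (fun a p => if cellAt g p.1 p.2 = "*" then a + 1 else a) n =
      n + L.countP (fun p => cellAt g p.1 p.2 == "*") := by
  induction L generalizing n with
  | nil => simp
  | cons p rest ih =>
    simp only [List.foldl_cons, List.countP_cons]
    by_cases h : cellAt g p.1 p.2 = "*"
    · simp [h, ih]; omega
    · simp [h, ih]

-- B's neighbour count equals A's running sum s4 (for in-range cells)
lemma k_eq_s4 (g : List (List String)) (r c : Nat) (hr : r < 5) (hc : c < 5) :
    (deltasB.foldl (fun k d =>
      let rr : Int := (r : Int) + d.1
      let cc : Int := (c : Int) + d.2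
      if 0 ≤ rr ∧ rr < 5 ∧ 0 ≤ cc ∧ cc < 5 ∧ cellAt g rr.toNat cc.toNat = "*" then k + 1
      else k) 0) =
    ((if r < 5 - 1 ∧ cellAt g (r+1) c = "*" then 1 else 0) +
     (if c < 5 - 1 ∧ cellAt g r (c+1) = "*" then 1 else 0) +
     (if 0 < r ∧ cellAt g (r-1) c = "*" then 1 else 0) +
     (if 0 < c ∧ cellAt g r (c-1) = "*" then 1 else 0)) := by
  have tA : ((r : Int) + -1).toNat = r - 1 := by omega
  have tB : ((r : Int) + 1).toNat = r + 1 := by omega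
  have tC : ((c : Int) + -1).toNat = c - 1 := by omega
  have tD : ((c : Int) + 1).toNat = c + 1 := by omega
  have t0r : ((r : Int) + 0).toNat = r := by omega
  have t0c : ((c : Int) + 0).toNat = c := by omega
  simp only [deltasB, List.foldl, tA, tB, tC, tD, t0r, t0c]
  have c1 : (0 ≤ (r : Int) + -1 ∧ (r : Int) + -1 < 5 ∧ 0 ≤ (c : Int) + 0 ∧ (c : Int) + 0 < 5 ∧
      cellAt g (r - 1) c = "*") ↔ (0 < r ∧ cellAt g (r - 1) c = "*") :=
    ⟨fun ⟨a, _, _, _, e⟩ => ⟨by omega, e⟩, fun ⟨a, e⟩ => ⟨by omega, by omega, by omega, by omega, e⟩⟩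
  have c2 : (0 ≤ (r : Int) + 1 ∧ (r : Int) + 1 < 5 ∧ 0 ≤ (c : Int) + 0 ∧ (c : Int) + 0 < 5 ∧
      cellAt g (r + 1) c = "*") ↔ (r < 5 - 1 ∧ cellAt g (r + 1) c = "*") :=
    ⟨fun ⟨_, a, _, _, e⟩ => ⟨by omega, e⟩, fun ⟨a, e⟩ => ⟨by omega, by omega, by omega, by omega, e⟩⟩
  have c3 : (0 ≤ (r : Int) + 0 ∧ (r : Int) + 0 < 5 ∧ 0 ≤ (c : Int) + -1 ∧ (c : Int) + -1 < 5 ∧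
      cellAt g r (c - 1) = "*") ↔ (0 < c ∧ cellAt g r (c - 1) = "*") :=
    ⟨fun ⟨_, _, a, _, e⟩ => ⟨by omega, e⟩, fun ⟨a, e⟩ => ⟨by omega, by omega, by omega, by omega, e⟩⟩
  have c4 : (0 ≤ (r : Int) + 0 ∧ (r : Int) + 0 < 5 ∧ 0 ≤ (c : Int) + 1 ∧ (c : Int) + 1 < 5 ∧
      cellAt g r (c + 1) = "*") ↔ (c < 5 - 1 ∧ cellAt g r (c + 1) = "*") :=
    ⟨fun ⟨_, _, _, a, e⟩ => ⟨by omega, e⟩, fun ⟨a, e⟩ => ⟨by omega, by omega, by omega, by omega, e⟩⟩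
  rw [if_congr c1 rfl rfl, if_congr c2 rfl rfl, if_congr c3 rfl rfl, if_congr c4 rfl rfl]
  split_ifs <;> omega

lemma bodyA_of_badB (g : List (List String)) (r c : Nat) (hr : r < 5) (hc : c < 5)
    (h : badB g r c = true) : bodyA g r c = true := by
  by_cases hs : cellAt g r c = "*"
  · simp only [badB, if_pos hs, k_eq_s4 g r c hr hc] at h
    simp only [bodyA, if_pos hs]
    by_cases t1 : r < 5 - 1 ∧ cellAt g (r+1) c = "*" ∧ 0 < c ∧
        cellAt g (r+1) (c-1) = "*" ∧ cellAt g r (c-1) = "*"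
    · rw [if_pos t1]
    · rw [if_neg t1]
      by_cases t2 : c < 5 - 1 ∧ cellAt g r (c+1) = "*" ∧ r < 5 - 1 ∧
          cellAt g (r+1) (c+1) = "*" ∧ cellAt g (r+1) c = "*"
      · rw [if_pos t2]
      · rw [if_neg t2]
        by_cases t3 : 0 < r ∧ cellAt g (r-1) c = "*" ∧ c < 5 - 1 ∧
            cellAt g (r-1) (c+1) = "*" ∧ cellAt g r (c+1) = "*"
        · rw [if_pos t3]
        · rw [if_neg t3]
          by_cases t4 : 0 < c ∧ cellAt g r (c-1) = "*" ∧ 0 < r ∧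
              cellAt g (r-1) (c-1) = "*" ∧ cellAt g (r-1) c = "*"
          · rw [if_pos t4]
          · rw [if_neg t4]; exact h
  · simp [badB, hs] at h

lemma bodyA_of_blkB (g : List (List String)) (r c : Nat) (hr : r < 4) (hc : c < 4)
    (h : blkB g r c = true) : bodyA g r c = true := by
  simp only [blkB, Bool.and_eq_true, beq_iff_eq] at h
  obtain ⟨⟨⟨h1, h2⟩, h3⟩, h4⟩ := h
  simp only [bodyA, if_pos h1]
  by_cases t1 : r < 5 - 1 ∧ cellAt g (r+1) c = "*" ∧ 0 < c ∧
      cellAt g (r+1) (c-1) = "*" ∧ cellAt g r (c-1) = "*"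
  · rw [if_pos t1]
  · rw [if_neg t1, if_pos ⟨by omega, h2, by omega, h4, h3⟩]

lemma bodyA_forward (g : List (List String)) (r c : Nat) (hr : r < 5) (hc : c < 5)
    (h : bodyA g r c = true) :
    (∃ q : Nat × Nat, q.1 < 4 ∧ q.2 < 4 ∧ blkB g q.1 q.2 = true) ∨ badB g r c = true := by
  by_cases hs : cellAt g r c = "*"
  · simp only [bodyA, if_pos hs] at h
    by_cases t1 : r < 5 - 1 ∧ cellAt g (r+1) c = "*" ∧ 0 < c ∧
        cellAt g (r+1) (c-1) = "*" ∧ cellAt g r (c-1) = "*"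
    · obtain ⟨hr4, hd, hc0, hdl, hl⟩ := t1
      left
      refine ⟨(r, c - 1), by omega, by omega, ?_⟩
      have e : c - 1 + 1 = c := by omega
      simp [blkB, e, hs, hd, hdl, hl]
    · rw [if_neg t1] at h
      by_cases t2 : c < 5 - 1 ∧ cellAt g r (c+1) = "*" ∧ r < 5 - 1 ∧
          cellAt g (r+1) (c+1) = "*" ∧ cellAt g (r+1) c = "*"
      · obtain ⟨hc4, hri, hr4, hdr, hd⟩ := t2
        left
        refine ⟨(r, c), by omega, by omega, ?_⟩
        simp [blkB, hs, hri, hdr, hd]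
      · rw [if_neg t2] at h
        by_cases t3 : 0 < r ∧ cellAt g (r-1) c = "*" ∧ c < 5 - 1 ∧
            cellAt g (r-1) (c+1) = "*" ∧ cellAt g r (c+1) = "*"
        · obtain ⟨hr0, hu, hc4, hur, hri⟩ := t3
          left
          refine ⟨(r - 1, c), by omega, by omega, ?_⟩
          have e : r - 1 + 1 = r := by omega
          simp [blkB, e, hs, hu, hur, hri]
        · rw [if_neg t3] at h
          by_cases t4 : 0 < c ∧ cellAt g r (c-1) = "*" ∧ 0 < r ∧
              cellAt g (r-1) (c-1) = "*" ∧ cellAt g (r-1) c = "*"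
          · obtain ⟨hc0, hl, hr0, hul, hu⟩ := t4
            left
            refine ⟨(r - 1, c - 1), by omega, by omega, ?_⟩
            have er : r - 1 + 1 = r := by omega
            have ec : c - 1 + 1 = c := by omega
            simp [blkB, er, ec, hs, hl, hul, hu]
          · rw [if_neg t4] at h
            right
            simp only [badB, if_pos hs, k_eq_s4 g r c hr hc]
            exact h
  · simp [bodyA, hs] at h

-- ===== VERDICT (by name: the statement is the Claim_ definition above) =====
theorem CzyWoda_spec : Claim_equal_CzyWoda := by
  intro g _ _
  unfold Spec_CzyWoda CzyWoda CzyWoda_alt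
  rw [count_eq, Nat.zero_add]
  by_cases hile : (pairs 5 5).countP (fun p => cellAt g p.1 p.2 == "*") < 2
  · simp [hile]
  · simp only [if_neg hile]
    rw [scanA_eq, scanBlkB_eq, scanBadB_eq]
    cases hX : (pairs 4 4).any (fun p => blkB g p.1 p.2) with
    | true =>
      obtain ⟨q, hq, hblk⟩ := List.any_eq_true.mp hX
      obtain ⟨hq1, hq2⟩ := mem_pairs.mp hq
      have : (pairs 5 5).any (fun p => bodyA g p.1 p.2) = true :=
        List.any_eq_true.mpr ⟨q, mem_pairs.mpr ⟨by omega, by omega⟩,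
          bodyA_of_blkB g q.1 q.2 hq1 hq2 hblk⟩
      simp [this]
    | false =>
      cases hY : (pairs 5 5).any (fun p => badB g p.1 p.2) with
      | true =>
        obtain ⟨q, hq, hbad⟩ := List.any_eq_true.mp hY
        obtain ⟨hq1, hq2⟩ := mem_pairs.mp hq
        have : (pairs 5 5).any (fun p => bodyA g p.1 p.2) = true :=
          List.any_eq_true.mpr ⟨q, hq, bodyA_of_badB g q.1 q.2 hq1 hq2 hbad⟩
        simp [this]
      | false =>
        have hZ : (pairs 5 5).any (fun p => bodyA g p.1 p.2) = false := by
          cases hZ : (pairs 5 5).any (fun p => bodyA g p.1 p.2) with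
          | false => rfl
          | true =>
            obtain ⟨q, hq, hbody⟩ := List.any_eq_true.mp hZ
            obtain ⟨hq1, hq2⟩ := mem_pairs.mp hq
            rcases bodyA_forward g q.1 q.2 hq1 hq2 hbody with ⟨p, hp1, hp2, hp⟩ | hbad
            · have hx : (pairs 4 4).any (fun p => blkB g p.1 p.2) = true :=
                List.any_eq_true.mpr ⟨p, mem_pairs.mpr ⟨hp1, hp2⟩, hp⟩
              rw [hX] at hx; exact absurd hx (by simp)
            · have hy : (pairs 5 5).any (fun p => badB g p.1 p.2) = true :=
                List.any_eq_true.mpr ⟨q, hq, hbad⟩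
              rw [hY] at hy; exact absurd hy (by simp)
        simp [hZ]
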